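-- pv_equiv track=rewrite | github.com/abaldeg/EjerciciosPython | Simulacro Parcial Programacion I Ej2.py | crearMatrix1
-- ===== SOURCE A (Python) =====
-- def crearMatrix1(n):
--     mat=[ ]
--     for i in range(n+1):
--         mat.append([0] * (n+1))
--
--     for i in range(n+1):
--         mat[0][i] = i
--
--     for i in range(n+1):
--         mat[i][0] = i
--
--     return (mat)
-- ===== SOURCE B (Python) =====
-- def crearMatrix1(n):
--     return [([j for j in range(n + 1)] if i == 0 else [i] + [0] * n)
--             for i in range(n + 1)]
-- ===== Notes on version B (the rewrite author's own statement) =====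
-- stated objective: simpler
-- what changed: Replaced A's allocate-then-patch structure (three separate passes: append n+1 zero rows, then overwrite row 0, then overwrite column 0) with a single comprehension that constructs each row directly from its index (row 0 is [0..n], row i>0 is [i]+[0]*n), so no cell is ever written twice.
import Mathlib
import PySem

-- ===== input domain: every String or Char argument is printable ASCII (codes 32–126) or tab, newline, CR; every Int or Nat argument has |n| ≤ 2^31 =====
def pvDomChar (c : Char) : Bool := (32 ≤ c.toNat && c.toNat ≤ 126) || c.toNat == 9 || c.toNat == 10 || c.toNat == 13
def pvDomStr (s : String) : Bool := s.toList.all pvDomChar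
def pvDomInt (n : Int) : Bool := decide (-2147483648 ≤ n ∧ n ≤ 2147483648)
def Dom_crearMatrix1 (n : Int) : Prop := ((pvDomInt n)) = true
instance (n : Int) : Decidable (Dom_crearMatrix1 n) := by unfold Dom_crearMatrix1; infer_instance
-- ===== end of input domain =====

-- B replaces A's allocate-then-patch-edges passes (append zero rows, then overwrite row 0, then column 0)
-- by one coordinate-driven nested comprehension; objective: simpler, same cost.

-- ===== PORT A =====
-- literal transliteration: append a zero row of length n+1, (n+1) times; then mat[0][i] = i; then mat[i][0] = i
def crearMatrix1 (n : Int) : List (List Int) :=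
  let mat := (PySem.List.pyRange 0 (n+1) 1).foldl
    (fun m _ => m ++ [List.replicate (n+1).toNat (0 : Int)]) []
  let mat := (PySem.List.pyRange 0 (n+1) 1).foldl
    (fun m i => m.modify 0 (fun row => row.set i.toNat i)) mat
  let mat := (PySem.List.pyRange 0 (n+1) 1).foldl
    (fun m i => m.modify i.toNat (fun row => row.set 0 i)) mat
  mat

-- ===== PORT B =====
-- literal transliteration of Source B: one comprehension building each row directly from its index
def crearMatrix1_alt (n : Int) : List (List Int) :=
  (PySem.List.pyRange 0 (n+1) 1).map (fun i =>
    if i = 0 then (PySem.List.pyRange 0 (n+1) 1).map (fun j => j)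
    else [i] ++ List.replicate n.toNat (0 : Int))

-- ===== PRECONDITION & SPEC =====
def Spec_crearMatrix1 (n : Int) (out : List (List Int)) : Prop := out = crearMatrix1_alt n
instance (n : Int) (out : List (List Int)) : Decidable (Spec_crearMatrix1 n out) := by unfold Spec_crearMatrix1; infer_instance

-- ===== CLAIM (what is proved, stated in full; the proofs are below) =====
def Claim_equal_crearMatrix1 : Prop := ∀ (n : Int), Dom_crearMatrix1 n → Spec_crearMatrix1 n (crearMatrix1 n)

-- ===== LEMMAS AND PROOFS =====

theorem pv_foldl_modify_zero {α β : Type} (g : β → α → α) :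
    ∀ (l : List β) (a : α) (rest : List α),
      l.foldl (fun m i => m.modify 0 (g i)) (a :: rest)
        = (l.foldl (fun r i => g i r) a) :: rest := by
  intro l
  induction l with
  | nil => simp
  | cons b t ih =>
    intro a rest
    simp only [List.foldl_cons]
    rw [show (a :: rest).modify 0 (g b) = g b a :: rest from by simp [List.modify]]
    exact ih _ _

theorem pv_len_foldl_set {α : Type} (f : Nat → α) :
    ∀ (N : Nat) (row : List α),
      ((List.range N).foldl (fun r k => r.set k (f k)) row).length = row.length := by
  intro N
  induction N with
  | zero => intro row; simp
  | succ m ih => intro row; simp [List.range_succ, List.foldl_append, ih]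

theorem pv_foldl_set_getElem? {α : Type} (f : Nat → α) :
    ∀ (N : Nat) (row : List α) (j : Nat),
      ((List.range N).foldl (fun r k => r.set k (f k)) row)[j]?
        = if j < N ∧ j < row.length then some (f j) else row[j]? := by
  intro N
  induction N with
  | zero => intro row j; simp
  | succ m ih =>
    intro row j
    rw [List.range_succ, List.foldl_append]
    simp only [List.foldl_cons, List.foldl_nil, List.getElem?_set, pv_len_foldl_set, ih]
    by_cases hjm : j = m
    · subst hjm
      by_cases hlen : j < row.length <;> simp [hlen]
    · have : ¬ m = j := fun h => hjm h.symm
      simp only [this, if_false]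
      by_cases h1 : j < m
      · have : j < m + 1 := by omega
        by_cases hlen : j < row.length <;> simp [h1, hlen, this]
      · have h2 : ¬ j < m + 1 := by omega
        simp [h1, h2]

theorem pv_foldl_modify_getElem? {α : Type} (g : Nat → α → α) :
    ∀ (N : Nat) (m : List α) (j : Nat),
      ((List.range N).foldl (fun r k => r.modify k (g k)) m)[j]?
        = if j < N then (m[j]?.map (g j)) else m[j]? := by
  intro N
  induction N with
  | zero => intro m j; simp
  | succ M ih =>
    intro m j
    rw [List.range_succ, List.foldl_append]
    simp only [List.foldl_cons, List.foldl_nil, List.getElem?_modify, ih]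
    by_cases hjM : j = M
    · subst hjM
      simp only [lt_irrefl, if_false, if_pos (Nat.lt_succ_self j)]
      cases m[j]? <;> simp
    · have hMj : ¬ M = j := fun h => hjM h.symm
      by_cases h1 : j < M
      · have h2 : j < M + 1 := by omega
        simp only [if_pos h1, if_pos h2]
        cases m[j]? <;> simp [hMj]
      · have h2 : ¬ j < M + 1 := by omega
        simp only [if_neg h1, if_neg h2]
        cases m[j]? <;> simp [hMj]

theorem pv_first_row (N : Nat) :
    (List.range N).foldl (fun r k => r.set k ((k : Int))) (List.replicate N (0 : Int))
      = (List.range N).map (fun k : Nat => (k : Int)) := by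
  apply List.ext_getElem?
  intro j
  rw [pv_foldl_set_getElem?]
  by_cases h : j < N
  · rw [if_pos ⟨h, by simpa using h⟩, List.getElem?_map, List.getElem?_range h]
    rfl
  · have hle : N ≤ j := Nat.le_of_not_lt h
    have hn : (List.range N)[j]? = none := List.getElem?_eq_none (by simpa using hle)
    have hr : (List.replicate N (0 : Int))[j]? = none := List.getElem?_eq_none (by simpa using hle)
    rw [if_neg (by rw [List.length_replicate]; omega), hr, List.getElem?_map, hn]
    rfl

theorem pv_foldl_append_const {α β : Type} (x : α) :
    ∀ (l : List β) (acc : List α),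
      l.foldl (fun m _ => m ++ [x]) acc = acc ++ List.replicate l.length x := by
  intro l
  induction l with
  | nil => simp
  | cons a t ih =>
    intro acc
    rw [List.foldl_cons, ih, List.length_cons, List.replicate_succ', List.append_assoc]
    congr 1
    rw [List.singleton_append, ← List.replicate_succ, List.replicate_succ']

theorem pv_main (N : Nat) :
    (let mat := (List.range N).foldl
        (fun m _ => m ++ [List.replicate N (0 : Int)]) [];
     let mat := (List.range N).foldl
        (fun m (k : Nat) => m.modify 0 (fun row => row.set k ((k : Int)))) mat;
     (List.range N).foldl
        (fun m (k : Nat) => m.modify k (fun row => row.set 0 ((k : Int)))) mat)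
    = (List.range N).map (fun i : Nat =>
        if (i : Int) = 0 then (List.range N).map (fun j : Nat => (j : Int))
        else [(i : Int)] ++ List.replicate (N - 1) (0 : Int)) := by
  simp only
  rw [pv_foldl_append_const, List.length_range, List.nil_append]
  rcases N with _ | M
  · simp
  · rw [List.replicate_succ, pv_foldl_modify_zero, pv_first_row]
    apply List.ext_getElem?
    intro i
    rw [pv_foldl_modify_getElem?]
    by_cases hi : i < M + 1
    · rw [if_pos hi, List.getElem?_map, List.getElem?_range hi]
      rcases i with _ | i'
      · -- row 0: the filled first row, with cell 0 re-set to 0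
        rw [List.getElem?_cons_zero]
        simp only [Nat.cast_zero, Option.map_some, Option.some.injEq]
        rw [List.range_succ_eq_map, List.map_cons, Nat.cast_zero, List.set_cons_zero]
        simp
      · -- row i'+1: the zero row with cell 0 set to i'+1
        have hlt : i' < M := by omega
        rw [List.getElem?_cons_succ, List.getElem?_replicate, if_pos hlt]
        simp only [Option.map_some, Option.some.injEq]
        rw [if_neg (by positivity), List.replicate_succ, List.set_cons_zero,
          List.singleton_append, Nat.add_sub_cancel]
    · rw [if_neg hi]
      rcases i with _ | i'
      · omega
      · have hL : (List.replicate M (List.replicate (M + 1) (0 : Int)))[i']? = none :=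
          List.getElem?_eq_none (by simpa using (by omega : M ≤ i'))
        have hn : (List.range (M + 1))[i' + 1]? = none :=
          List.getElem?_eq_none (by simpa using (by omega : M + 1 ≤ i' + 1))
        rw [List.getElem?_cons_succ, hL, List.getElem?_map, hn]
        rfl

-- ===== VERDICT (by name: the statement is the Claim_ definition above) =====
theorem crearMatrix1_spec : Claim_equal_crearMatrix1 := by
  intro n _
  unfold Spec_crearMatrix1 crearMatrix1 crearMatrix1_alt
  have hR : PySem.List.pyRange 0 (n+1) 1
      = (List.range (n+1).toNat).map (fun k : Nat => (k : Int)) := by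
    rw [PySem.List.pyRange_one]
    simp
  rw [hR]
  simp only [List.foldl_map, List.map_map, Function.comp_def, Int.toNat_natCast]
  rw [show n.toNat = (n+1).toNat - 1 from by omega]
  exact pv_main (n+1).toNat
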